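-- pv_equiv track=rewrite | github.com/ZoeChengYu/python | CNOV2425.py | find_keyword
-- ===== SOURCE A (Python) =====
-- def find_keyword(data):
--     # 驗證括號是否平衡
--     up = ['(', '[', '{']
--     down = [')', ']', '}']
--     stable = []
--
--     for char in data:
--         if char in up:
--             stable.append(char)
--         elif char in down:
--             if stable and ((char == ')' and stable[-1] == '(') or
--                            (char == ']' and stable[-1] == '[') or
--                            (char == '}' and stable[-1] == '{')):
--                 stable.pop()
--             else:
--                 stable.append(char)
--
--     return stable  # 返回未平衡的括號清單
-- ===== SOURCE B (Python) =====
-- def find_keyword(data):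
--     # Fixed-point reduction: keep only brackets, then repeatedly delete
--     # adjacent matching pairs until a full pass removes nothing.
--     brackets = ('(', '[', '{', ')', ']', '}')
--     pairs = {('(', ')'), ('[', ']'), ('{', '}')}
--     rem = [c for c in data if c in brackets]
--     changed = True
--     while changed:
--         changed = False
--         out = []
--         i = 0
--         while i < len(rem):
--             if i + 1 < len(rem) and (rem[i], rem[i + 1]) in pairs:
--                 i += 2
--                 changed = True
--             else:
--                 out.append(rem[i])
--                 i += 1
--         rem = out
--     return rem
-- ===== Notes on version B (the rewrite author's own statement) =====
-- stated objective: alternative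
-- what changed: Replaces A's single-pass stack scan with a fixed-point rewriting: filter the input down to its bracket characters, then repeatedly sweep the list deleting adjacent matching pairs until a sweep removes nothing.
import Mathlib
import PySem

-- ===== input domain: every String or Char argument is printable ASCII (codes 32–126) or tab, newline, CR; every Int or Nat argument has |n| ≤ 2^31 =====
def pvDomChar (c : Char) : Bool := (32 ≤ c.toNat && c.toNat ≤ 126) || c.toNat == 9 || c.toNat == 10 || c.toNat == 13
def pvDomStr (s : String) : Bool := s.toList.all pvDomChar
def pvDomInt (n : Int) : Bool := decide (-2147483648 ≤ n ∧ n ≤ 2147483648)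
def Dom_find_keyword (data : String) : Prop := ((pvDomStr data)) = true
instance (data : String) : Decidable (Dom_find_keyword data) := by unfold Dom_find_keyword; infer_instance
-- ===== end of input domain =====

-- B replaces A's stack scan by a fixed-point reduction that repeatedly deletes
-- adjacent matching bracket pairs from the filtered bracket list (objective: alternative).


-- ===== PORT A =====
-- the loop body: push openers; on a closer, pop a matching top else push
def pvStepA (stable : List String) (char : Char) : List String :=
  if char ∈ ['(', '[', '{'] then stable ++ [char.toString]
  else if char ∈ [')', ']', '}'] then
    if stable ≠ [] ∧ ((char = ')' ∧ stable.getLast? = some "(") ∨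
                      (char = ']' ∧ stable.getLast? = some "[") ∨
                      (char = '}' ∧ stable.getLast? = some "{")) then
      stable.dropLast
    else stable ++ [char.toString]
  else stable

def find_keyword (data : String) : List String :=
  data.toList.foldl pvStepA []

-- ===== PORT B =====
def pvIsBracketChar (c : Char) : Bool := c ∈ ['(', '[', '{', ')', ']', '}']

def pvIsPair (x y : String) : Bool :=
  (x == "(" && y == ")") || (x == "[" && y == "]") || (x == "{" && y == "}")

-- one scan of Source B's inner while-loop: delete adjacent matching pairs
-- left-to-right, report whether anything was deleted
def pvPass : List String → List String × Bool
  | x :: y :: rest =>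
    if pvIsPair x y then ((pvPass rest).1, true)
    else ((x :: (pvPass (y :: rest)).1), (pvPass (y :: rest)).2)
  | [x] => ([x], false)
  | [] => ([], false)

theorem pvPass_le : ∀ l : List String, (pvPass l).1.length ≤ l.length
  | [] => by simp [pvPass]
  | [x] => by simp [pvPass]
  | x :: y :: rest => by
    by_cases hp : pvIsPair x y = true
    · rw [pvPass, if_pos hp]
      have := pvPass_le rest
      simp only [List.length_cons]
      omega
    · rw [pvPass, if_neg hp]
      have := pvPass_le (y :: rest)
      simp only [List.length_cons] at this ⊢
      omega

theorem pvPass_lt : ∀ l : List String, (pvPass l).2 = true → (pvPass l).1.length < l.length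
  | [] => by simp [pvPass]
  | [x] => by simp [pvPass]
  | x :: y :: rest => by
    intro h
    by_cases hp : pvIsPair x y = true
    · rw [pvPass, if_pos hp]
      have := pvPass_le rest
      simp only [List.length_cons]
      omega
    · rw [pvPass, if_neg hp] at h ⊢
      simp only at h
      have := pvPass_lt (y :: rest) h
      simp only [List.length_cons] at this ⊢
      omega

-- the outer while-loop: repeat the pass until nothing was deleted
def pvReduce (l : List String) : List String :=
  if (pvPass l).2 then pvReduce (pvPass l).1 else (pvPass l).1
termination_by l.length
decreasing_by
  rename_i hp
  exact pvPass_lt l hp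

def find_keyword_alt (data : String) : List String :=
  pvReduce ((data.toList.filter pvIsBracketChar).map Char.toString)

-- ===== PRECONDITION & SPEC =====
def Spec_find_keyword (data : String) (out : List String) : Prop := out = find_keyword_alt data
instance (data : String) (out : List String) : Decidable (Spec_find_keyword data out) := by unfold Spec_find_keyword; infer_instance

-- ===== CLAIM (what is proved, stated in full; the proofs are below) =====
def Claim_equal_find_keyword : Prop := ∀ (data : String), Dom_find_keyword data → Spec_find_keyword data (find_keyword data)

-- ===== LEMMAS AND PROOFS =====

-- A's step, lifted to the string elements A actually pushes
def pvStepS (stable : List String) (s : String) : List String :=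
  if s ∈ ["(", "[", "{"] then stable ++ [s]
  else if s ∈ [")", "]", "}"] then
    if stable ≠ [] ∧ ((s = ")" ∧ stable.getLast? = some "(") ∨
                      (s = "]" ∧ stable.getLast? = some "[") ∨
                      (s = "}" ∧ stable.getLast? = some "{")) then
      stable.dropLast
    else stable ++ [s]
  else stable

def pvBracketStr (s : String) : Prop := s ∈ ["(", "[", "{", ")", "]", "}"]

theorem pvStepA_eq (st : List String) (c : Char) (h : pvIsBracketChar c = true) :
    pvStepA st c = pvStepS st c.toString := by
  simp only [pvIsBracketChar, List.mem_cons, List.not_mem_nil, or_false,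
    decide_eq_true_eq] at h
  have e1 : String.singleton '(' = "(" := rfl
  have e2 : String.singleton '[' = "[" := rfl
  have e3 : String.singleton '{' = "{" := rfl
  have e4 : String.singleton ')' = ")" := rfl
  have e5 : String.singleton ']' = "]" := rfl
  have e6 : String.singleton '}' = "}" := rfl
  rcases h with rfl | rfl | rfl | rfl | rfl | rfl <;>
    simp [pvStepA, pvStepS, e1, e2, e3, e4, e5, e6]

theorem pvStepA_skip (st : List String) (c : Char) (h : pvIsBracketChar c = false) :
    pvStepA st c = st := by
  simp only [pvIsBracketChar, List.mem_cons, List.not_mem_nil, or_false,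
    decide_eq_false_iff_not, not_or] at h
  simp only [pvStepA]
  rw [if_neg (by simp [List.mem_cons]; tauto), if_neg (by simp [List.mem_cons]; tauto)]

theorem pvFoldA_filter (cs : List Char) : ∀ st : List String,
    cs.foldl pvStepA st = ((cs.filter pvIsBracketChar).map Char.toString).foldl pvStepS st := by
  induction cs with
  | nil => simp
  | cons c cs ih =>
    intro st
    by_cases h : pvIsBracketChar c = true
    · simp [List.filter_cons, h, pvStepA_eq st c h, ih]
    · simp only [Bool.not_eq_true] at h
      simp [List.filter_cons, h, pvStepA_skip st c h, ih]

-- cancellation: pushing an opener then its matching closer is a no-op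
theorem pvStepS_cancel (st : List String) (x y : String) (h : pvIsPair x y = true) :
    pvStepS (pvStepS st x) y = st := by
  simp only [pvIsPair, Bool.or_eq_true, Bool.and_eq_true, beq_iff_eq] at h
  rcases h with (⟨rfl, rfl⟩ | ⟨rfl, rfl⟩) | ⟨rfl, rfl⟩ <;>
    simp [pvStepS, List.getLast?_append]

-- a pass does not change the value of the stack fold
theorem pvFold_pass : ∀ (l : List String) (st : List String),
    (pvPass l).1.foldl pvStepS st = l.foldl pvStepS st
  | [], st => by simp [pvPass]
  | [x], st => by simp [pvPass]
  | x :: y :: rest, st => by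
    by_cases h : pvIsPair x y = true
    · rw [pvPass, if_pos h]
      simp only [List.foldl_cons]
      rw [pvFold_pass rest st, pvStepS_cancel st x y h]
    · rw [pvPass, if_neg h]
      simp only [List.foldl_cons]
      exact pvFold_pass (y :: rest) (pvStepS st x)

-- membership is preserved by a pass
theorem pvPass_subset : ∀ (l : List String) (x : String), x ∈ (pvPass l).1 → x ∈ l
  | [], x => by simp [pvPass]
  | [a], x => by simp [pvPass]
  | a :: b :: rest, x => by
    intro hx
    by_cases h : pvIsPair a b = true
    · rw [pvPass, if_pos h] at hx
      have := pvPass_subset rest x hx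
      simp [this]
    · rw [pvPass, if_neg h] at hx
      rcases List.mem_cons.mp hx with h1 | h1
      · simp [h1]
      · have := pvPass_subset (b :: rest) x h1
        simp_all [List.mem_cons]

-- an unchanged pass returns its input
theorem pvPass_fix : ∀ l : List String, (pvPass l).2 = false → (pvPass l).1 = l
  | [] => by simp [pvPass]
  | [x] => by simp [pvPass]
  | x :: y :: rest => by
    intro h
    by_cases hp : pvIsPair x y = true
    · rw [pvPass, if_pos hp] at h
      simp at h
    · rw [pvPass, if_neg hp] at h ⊢
      simp only at h
      simp [pvPass_fix (y :: rest) h]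

-- an unchanged pass means no adjacent matching pair
theorem pvPass_chain : ∀ l : List String, (pvPass l).2 = false →
    List.IsChain (fun a b => pvIsPair a b = false) l
  | [] => fun _ => List.IsChain.nil
  | [x] => fun _ => List.IsChain.singleton x
  | x :: y :: rest => by
    intro h
    by_cases hp : pvIsPair x y = true
    · rw [pvPass, if_pos hp] at h
      simp at h
    · rw [pvPass, if_neg hp] at h
      simp only at h
      have := pvPass_chain (y :: rest) h
      exact List.isChain_cons_cons.mpr ⟨by simp_all, this⟩

-- over bracket strings with no adjacent matching pair, the stack fold only pushes
theorem pvFold_irred : ∀ (l : List String) (st : List String),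
    (∀ x ∈ l, pvBracketStr x) →
    List.IsChain (fun a b => pvIsPair a b = false) (st ++ l) →
    l.foldl pvStepS st = st ++ l := by
  intro l
  induction l with
  | nil => simp
  | cons c rest ih =>
    intro st hbr hch
    have hcb : pvBracketStr c := hbr c (by simp)
    have hbound : ∀ x, st.getLast? = some x → pvIsPair x c = false := by
      intro x hx
      rcases (List.isChain_append.mp hch) with ⟨_, _, hb⟩
      exact hb x (by simp [hx]) c (by simp)
    have hstep : pvStepS st c = st ++ [c] := by
      simp only [pvBracketStr, List.mem_cons, List.not_mem_nil, or_false] at hcb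
      rcases hcb with rfl | rfl | rfl | rfl | rfl | rfl <;>
        (simp only [pvStepS]
         split_ifs with h1 h2 h3 <;>
           first
             | rfl
             | (exact absurd (by decide) h1)
             | (exact absurd (by decide) h2)
             | (exfalso
                obtain ⟨-, hc⟩ := h3
                rcases hc with ⟨he, hl⟩ | ⟨he, hl⟩ | ⟨he, hl⟩ <;>
                  first
                    | exact absurd he (by decide)
                    | exact absurd (hbound _ hl) (by decide)))
    have hch' : List.IsChain (fun a b => pvIsPair a b = false) ((st ++ [c]) ++ rest) := by
      rwa [List.append_assoc, List.singleton_append]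
    rw [List.foldl_cons, hstep, ih (st ++ [c]) (fun x hx => hbr x (by simp [hx])) hch']
    simp

-- main: the fixed-point reduction computes the stack fold, for bracket-only lists
theorem pvReduce_eq (l : List String) (hbr : ∀ x ∈ l, pvBracketStr x) :
    pvReduce l = l.foldl pvStepS [] := by
  rw [pvReduce]
  by_cases h : (pvPass l).2 = true
  · rw [if_pos h]
    have hbr' : ∀ x ∈ (pvPass l).1, pvBracketStr x :=
      fun x hx => hbr x (pvPass_subset l x hx)
    rw [pvReduce_eq (pvPass l).1 hbr', pvFold_pass l []]
  · rw [if_neg h]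
    simp only [Bool.not_eq_true] at h
    rw [pvPass_fix l h]
    have := pvFold_irred l [] hbr (by simpa using pvPass_chain l h)
    simp [this]
termination_by l.length
decreasing_by
  exact pvPass_lt l h

-- ===== VERDICT (by name: the statement is the Claim_ definition above) =====
theorem find_keyword_spec : Claim_equal_find_keyword := by
  intro data _
  unfold Spec_find_keyword find_keyword find_keyword_alt
  rw [pvFoldA_filter]
  rw [pvReduce_eq]
  intro x hx
  simp only [List.mem_map, List.mem_filter] at hx
  obtain ⟨c, ⟨_, hc⟩, rfl⟩ := hx
  simp only [pvIsBracketChar, List.mem_cons, List.not_mem_nil, or_false,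
    decide_eq_true_eq] at hc
  have e1 : String.singleton '(' = "(" := rfl
  have e2 : String.singleton '[' = "[" := rfl
  have e3 : String.singleton '{' = "{" := rfl
  have e4 : String.singleton ')' = ")" := rfl
  have e5 : String.singleton ']' = "]" := rfl
  have e6 : String.singleton '}' = "}" := rfl
  rcases hc with rfl | rfl | rfl | rfl | rfl | rfl <;>
    simp [pvBracketStr, e1, e2, e3, e4, e5, e6]
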